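-- pv_equiv track=rewrite | github.com/2694915593/sql_AI | data_collector/data_value_fetcher.py | _remove_common_suffixes
-- ===== SOURCE A (Python) =====
-- def _remove_common_suffixes(text: str) -> str:
--     """移除常见的后缀"""
--     if not text:
--         return ""
--     suffixes = ['_id', '_no', '_num', '_code', '_name', '_value', '_type', '_status']
--     for suffix in suffixes:
--         if text.endswith(suffix):
--             return text[:-len(suffix)]
--     return text
-- ===== SOURCE B (Python) =====
-- _SUFFIX_WORDS = {s[1:] for s in ['_id', '_no', '_num', '_code', '_name', '_value', '_type', '_status']}
--
--
-- def _remove_common_suffixes(text: str) -> str: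
--     """移除常见的后缀"""
--     if not text:
--         return ""
--     head, sep, tail = text.rpartition('_')
--     if sep and tail in _SUFFIX_WORDS:
--         return head
--     return text
-- ===== Notes on version B (the rewrite author's own statement) =====
-- stated objective: idiomatic
-- what changed: Replaces the linear scan of eight endswith tests with a single rpartition at the last underscore followed by one set-membership lookup of the trailing word; correct because every listed suffix is an underscore plus an underscore-free word.
import Mathlib
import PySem

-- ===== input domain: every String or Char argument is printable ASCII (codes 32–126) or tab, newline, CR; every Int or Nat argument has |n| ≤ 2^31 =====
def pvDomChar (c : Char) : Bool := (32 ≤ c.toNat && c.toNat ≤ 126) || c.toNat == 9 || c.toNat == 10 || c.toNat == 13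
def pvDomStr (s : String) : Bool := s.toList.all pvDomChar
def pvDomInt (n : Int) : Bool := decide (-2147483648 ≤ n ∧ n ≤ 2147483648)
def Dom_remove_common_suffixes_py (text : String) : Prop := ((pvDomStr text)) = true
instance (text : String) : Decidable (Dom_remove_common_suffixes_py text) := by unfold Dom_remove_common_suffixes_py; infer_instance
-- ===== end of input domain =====

-- B replaces A's scan of eight endswith tests by one rpartition at the last underscore plus a set lookup of the trailing word (idiomatic; same cost class).

-- ===== PORT A =====
def pvSuffixesA : List String := ["_id", "_no", "_num", "_code", "_name", "_value", "_type", "_status"]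

def pvRemoveLoopA (text : String) : List String → String
  | [] => text
  | sfx :: rest =>
    if PySem.Str.endswith text sfx then
      PySem.Str.slice text none (some (-(PySem.Str.len sfx : Int)))
    else pvRemoveLoopA text rest

def remove_common_suffixes_py (text : String) : String :=
  if text = "" then "" else pvRemoveLoopA text pvSuffixesA

-- ===== PORT B =====
-- hand port of str.rpartition with a single-character separator (exact: splits at the LAST occurrence of sep)
def pvRPartitionChar (s : String) (sep : Char) : String × String × String :=
  match s.toList.reverse.span (fun c => c != sep) with
  | (_, []) => ("", "", s)
  | (tr, _ :: hr) => (String.ofList hr.reverse, String.ofList [sep], String.ofList tr.reverse)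

def pvSuffixWords : List String :=
  PySem.Set.ofList ((["_id", "_no", "_num", "_code", "_name", "_value", "_type", "_status"]).map
    (fun s => PySem.Str.slice s (some 1) none))

def remove_common_suffixes_py_alt (text : String) : String :=
  if text = "" then "" else
    match pvRPartitionChar text '_' with
    | (head, sep, tail) => if sep ≠ "" ∧ tail ∈ pvSuffixWords then head else text

-- ===== PRECONDITION & SPEC =====
def Spec_remove_common_suffixes_py (text : String) (out : String) : Prop := out = remove_common_suffixes_py_alt text
instance (text : String) (out : String) : Decidable (Spec_remove_common_suffixes_py text out) := by unfold Spec_remove_common_suffixes_py; infer_instance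

-- ===== CLAIM (what is proved, stated in full; the proofs are below) =====
def Claim_equal_remove_common_suffixes_py : Prop := ∀ (text : String), Dom_remove_common_suffixes_py text → Spec_remove_common_suffixes_py text (remove_common_suffixes_py text)

-- ===== LEMMAS AND PROOFS =====

-- a word without '_' followed by '_' is a prefix of u ++ '_' :: p (u underscore-free) iff the word IS u
lemma pv_prefix_iff (wr : List Char) (hw : ('_' : Char) ∉ wr) (u : List Char)
    (hu : ∀ x ∈ u, x ≠ '_') (p : List Char) :
    ((wr ++ ['_']) <+: (u ++ '_' :: p)) ↔ wr = u := by
  induction wr generalizing u with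
  | nil =>
    cases u with
    | nil => simp
    | cons x u' =>
      simp only [List.nil_append, List.cons_append, List.cons_prefix_cons]
      constructor
      · rintro ⟨h1, -⟩; exact absurd h1.symm (hu x (by simp))
      · intro h; simp at h
  | cons a wr' ih =>
    have ha : a ≠ '_' := by intro h; exact hw (by simp [h])
    have hw' : ('_' : Char) ∉ wr' := fun h => hw (by simp [h])
    cases u with
    | nil =>
      simp only [List.cons_append, List.nil_append, List.cons_prefix_cons]
      constructor
      · rintro ⟨h1, -⟩; exact absurd h1 ha
      · intro h; simp at h
    | cons x u' =>
      have hu' : ∀ x ∈ u', x ≠ '_' := fun y hy => hu y (by simp [hy])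
      simp only [List.cons_append, List.cons_prefix_cons]
      rw [ih hw' u' hu' ]
      constructor
      · rintro ⟨h1, h2⟩; rw [h1, h2]
      · intro h; injection h with h1 h2; exact ⟨h1, h2⟩

lemma pv_endswith_iff_eq (text : String) (u p : List Char)
    (hu : ∀ x ∈ u, x ≠ '_') (hrev : text.toList.reverse = u ++ '_' :: p)
    (sfx : String) (word : List Char) (hsfx : sfx.toList = '_' :: word)
    (hw : ('_' : Char) ∉ word) :
    (PySem.Str.endswith text sfx = true) ↔ u = word.reverse := by
  have h1 : (PySem.Str.endswith text sfx = true) ↔ sfx.toList <:+ text.toList := by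
    rw [show PySem.Str.endswith text sfx = PySem.Chars.endswith text.toList sfx.toList from by simp]
    exact PySem.Chars.endswith_iff _ _
  rw [h1, hsfx, ← List.reverse_prefix, hrev, List.reverse_cons,
      pv_prefix_iff word.reverse (by simpa using hw) u hu p, eq_comm]

lemma pv_slice_val (text : String) (u p : List Char)
    (hrev : text.toList.reverse = u ++ '_' :: p) (k : Int) (hk : k = u.length + 1) :
    PySem.Str.slice text none (some (-k)) = String.ofList p.reverse := by
  apply String.toList_inj.mp
  have hk' : k = ((u.length + 1 : Nat) : Int) := by push_cast; omega
  rw [PySem.Str.toList_slice, PySem.Chars.slice_eq_listSlice, hk',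
      PySem.List.slice_to_neg_natCast text.toList (u.length + 1) (by omega)]
  have htext : text.toList = p.reverse ++ '_' :: u.reverse := by
    have := congrArg List.reverse hrev
    simpa using this
  rw [htext]
  have hlen : (p.reverse ++ '_' :: u.reverse).length - (u.length + 1) = p.reverse.length := by
    simp
  rw [hlen, List.take_left]
  simp

lemma pv_ofList_rev_eq (u : List Char) (s : String) (l : List Char)
    (hs : s.toList.reverse = l) : (String.ofList u.reverse = s) ↔ u = l := by
  subst hs
  rw [← String.toList_inj]
  simp [List.reverse_eq_iff]

lemma pv_not_endswith (text : String) (h : ('_' : Char) ∉ text.toList)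
    (sfx : String) (hs : ('_' : Char) ∈ sfx.toList) :
    PySem.Str.endswith text sfx = false := by
  rw [Bool.eq_false_iff]
  intro hT
  have h1 : sfx.toList <:+ text.toList := by
    rw [show PySem.Str.endswith text sfx = PySem.Chars.endswith text.toList sfx.toList from by simp] at hT
    exact (PySem.Chars.endswith_iff _ _).mp hT
  exact h (h1.subset hs)

-- ===== VERDICT (by name: the statement is the Claim_ definition above) =====
theorem remove_common_suffixes_py_spec : Claim_equal_remove_common_suffixes_py := by
  intro text _
  unfold Spec_remove_common_suffixes_py remove_common_suffixes_py remove_common_suffixes_py_alt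
  by_cases h0 : text = ""
  · simp [h0]
  · simp only [h0, if_false]
    rcases hdw : text.toList.reverse.dropWhile (fun c => c != '_') with _ | ⟨c, p⟩
    · -- no underscore in text: both sides return text
      have hnu : ('_' : Char) ∉ text.toList := by
        intro hm
        have hall := List.dropWhile_eq_nil_iff.mp hdw
        have := hall _ (List.mem_reverse.mpr hm)
        simp at this
      have f1 := pv_not_endswith text hnu "_id" (by decide)
      have f2 := pv_not_endswith text hnu "_no" (by decide)
      have f3 := pv_not_endswith text hnu "_num" (by decide)
      have f4 := pv_not_endswith text hnu "_code" (by decide)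
      have f5 := pv_not_endswith text hnu "_name" (by decide)
      have f6 := pv_not_endswith text hnu "_value" (by decide)
      have f7 := pv_not_endswith text hnu "_type" (by decide)
      have f8 := pv_not_endswith text hnu "_status" (by decide)
      have hA : pvRemoveLoopA text pvSuffixesA = text := by
        simp only [pvSuffixesA, pvRemoveLoopA, f1, f2, f3, f4, f5, f6, f7, f8]
        simp
      rw [hA]
      simp [pvRPartitionChar, List.span_eq_takeWhile_dropWhile, hdw]
    · -- text has an underscore; c is the last one
      have hc : c = '_' := by
        have := List.head_dropWhile_not (fun c => c != '_') (l := text.toList.reverse) (by simp [hdw])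
        simpa [hdw] using this
      subst hc
      have hu : ∀ x ∈ text.toList.reverse.takeWhile (fun c => c != '_'), x ≠ '_' := by
        intro x hx
        simpa using List.mem_takeWhile_imp hx
      set u := text.toList.reverse.takeWhile (fun c => c != '_') with hu_def
      have hrev : text.toList.reverse = u ++ '_' :: p := by
        conv_lhs => rw [← List.takeWhile_append_dropWhile (p := fun c => c != '_')
          (l := text.toList.reverse)]
        rw [hdw]
      have hspan : text.toList.reverse.span (fun c => c != '_') = (u, '_' :: p) := by
        rw [List.span_eq_takeWhile_dropWhile, hdw]
      have e1 := pv_endswith_iff_eq text u p hu hrev "_id" ['i','d'] rfl (by decide)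
      have e2 := pv_endswith_iff_eq text u p hu hrev "_no" ['n','o'] rfl (by decide)
      have e3 := pv_endswith_iff_eq text u p hu hrev "_num" ['n','u','m'] rfl (by decide)
      have e4 := pv_endswith_iff_eq text u p hu hrev "_code" ['c','o','d','e'] rfl (by decide)
      have e5 := pv_endswith_iff_eq text u p hu hrev "_name" ['n','a','m','e'] rfl (by decide)
      have e6 := pv_endswith_iff_eq text u p hu hrev "_value" ['v','a','l','u','e'] rfl (by decide)
      have e7 := pv_endswith_iff_eq text u p hu hrev "_type" ['t','y','p','e'] rfl (by decide)
      have e8 := pv_endswith_iff_eq text u p hu hrev "_status" ['s','t','a','t','u','s'] rfl (by decide)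
      simp only [List.reverse_cons, List.reverse_nil, List.nil_append,
        List.cons_append] at e1 e2 e3 e4 e5 e6 e7 e8
      have hmem : (String.ofList u.reverse ∈ pvSuffixWords) ↔
          (u = ['d','i'] ∨ u = ['o','n'] ∨ u = ['m','u','n'] ∨ u = ['e','d','o','c'] ∨
           u = ['e','m','a','n'] ∨ u = ['e','u','l','a','v'] ∨ u = ['e','p','y','t'] ∨
           u = ['s','u','t','a','t','s']) := by
        rw [show pvSuffixWords = ["id","no","num","code","name","value","type","status"] from rfl]
        simp only [List.mem_cons, List.not_mem_nil, or_false,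
          pv_ofList_rev_eq u "id" ['d','i'] rfl,
          pv_ofList_rev_eq u "no" ['o','n'] rfl,
          pv_ofList_rev_eq u "num" ['m','u','n'] rfl,
          pv_ofList_rev_eq u "code" ['e','d','o','c'] rfl,
          pv_ofList_rev_eq u "name" ['e','m','a','n'] rfl,
          pv_ofList_rev_eq u "value" ['e','u','l','a','v'] rfl,
          pv_ofList_rev_eq u "type" ['e','p','y','t'] rfl,
          pv_ofList_rev_eq u "status" ['s','u','t','a','t','s'] rfl]
      simp only [pvRemoveLoopA, pvSuffixesA, e1, e2, e3, e4, e5, e6, e7, e8,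
        pvRPartitionChar, hspan]
      simp only [hmem]
      by_cases h1 : u = ['d','i']
      · simp only [h1]
        norm_num
        exact pv_slice_val text u p hrev 3 (by rw [h1]; norm_num)
      by_cases h2 : u = ['o','n']
      · simp only [h2]
        norm_num [show (['o','n'] : List Char) ≠ ['d','i'] from by decide]
        exact pv_slice_val text u p hrev 3 (by rw [h2]; norm_num)
      by_cases h3 : u = ['m','u','n']
      · simp [h3]
        exact pv_slice_val text u p hrev 4 (by rw [h3]; norm_num)
      by_cases h4 : u = ['e','d','o','c']
      · simp [h4]
        exact pv_slice_val text u p hrev 5 (by rw [h4]; norm_num)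
      by_cases h5 : u = ['e','m','a','n']
      · simp [h5]
        exact pv_slice_val text u p hrev 5 (by rw [h5]; norm_num)
      by_cases h6 : u = ['e','u','l','a','v']
      · simp [h6]
        exact pv_slice_val text u p hrev 6 (by rw [h6]; norm_num)
      by_cases h7 : u = ['e','p','y','t']
      · simp [h7]
        exact pv_slice_val text u p hrev 5 (by rw [h7]; norm_num)
      by_cases h8 : u = ['s','u','t','a','t','s']
      · simp [h8]
        exact pv_slice_val text u p hrev 7 (by rw [h8]; norm_num)
      · simp [h1, h2, h3, h4, h5, h6, h7, h8]
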